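-- pv_equiv track=rewrite | github.com/lhduc02/Learn-Python | Constructed_Numbers.py | tong_so
-- ===== SOURCE A (Python) =====
-- def tong_so(a):
--     a = [*a]
--     a.insert(0, '*')
--     s = 0
--     so = 0
--     j = 0
--     for i in range(len(a)-1, -1, -1):
--         if a[i].isnumeric():
--             so += int(a[i])*(10**j)
--             j+=1
--         else:
--             s += so
--             so = 0
--             j = 0
--     return s
-- ===== SOURCE B (Python) =====
-- def tong_so(a):
--     total = 0
--     cur = 0
--     for c in a:
--         if c.isnumeric():
--             cur = cur * 10 + int(c)
--         else:
--             total += cur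
--             cur = 0
--     return total + cur
-- ===== Notes on version B (the rewrite author's own statement) =====
-- stated objective: simpler
-- what changed: B replaces A's backward indexed scan over a sentinel-prefixed list copy with explicit powers of ten by a single forward pass that accumulates each digit run Horner-style and flushes it on a non-digit.
import Mathlib
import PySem

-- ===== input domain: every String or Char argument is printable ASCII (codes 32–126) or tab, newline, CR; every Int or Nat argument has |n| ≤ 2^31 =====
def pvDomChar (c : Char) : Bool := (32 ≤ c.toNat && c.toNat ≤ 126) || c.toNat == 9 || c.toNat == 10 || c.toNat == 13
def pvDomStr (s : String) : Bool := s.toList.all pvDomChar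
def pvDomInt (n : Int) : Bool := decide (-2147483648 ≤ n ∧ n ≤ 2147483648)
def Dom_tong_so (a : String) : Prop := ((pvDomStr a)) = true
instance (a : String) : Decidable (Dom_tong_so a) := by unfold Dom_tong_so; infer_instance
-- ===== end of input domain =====

-- B replaces A's backward indexed scan with sentinel and explicit powers of ten by a
-- single forward pass that accumulates each run of digits Horner-style (simpler).

-- ===== PORT A =====
-- str.isnumeric() is ported as PySem.Chars.isdigit and int(<digit char>) as its code
-- minus 48: both are exact on the printable-ASCII domain Dom_tong_so, where the only
-- numeric characters are '0'..'9'.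
def tong_so (a : String) : Int :=
  let l := '*' :: a.toList          -- a = [*a]; a.insert(0, '*')
  let st := (PySem.List.pyRange (PySem.List.len l - 1) (-1) (-1)).foldl
    (fun (st : Int × Int × Nat) i =>
      let c := PySem.List.pyGetD l i ' '
      if PySem.Chars.isdigit c then
        (st.1, st.2.1 + ((c.toNat : Int) - 48) * 10 ^ st.2.2, st.2.2 + 1)
      else
        (st.1 + st.2.1, 0, 0))
    (0, 0, 0)
  st.1

-- ===== PORT B =====
-- same isnumeric/int(<digit char>) porting note as for A: exact on Dom_tong_so.
def tong_so_alt (a : String) : Int :=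
  let st := a.toList.foldl
    (fun (st : Int × Int) c =>
      if PySem.Chars.isdigit c then (st.1, st.2 * 10 + ((c.toNat : Int) - 48))
      else (st.1 + st.2, 0))
    ((0 : Int), (0 : Int))
  st.1 + st.2

-- ===== PRECONDITION & SPEC =====
def Spec_tong_so (a : String) (out : Int) : Prop := out = tong_so_alt a
instance (a : String) (out : Int) : Decidable (Spec_tong_so a out) := by unfold Spec_tong_so; infer_instance

-- ===== CLAIM (what is proved, stated in full; the proofs are below) =====
def Claim_equal_tong_so : Prop := ∀ (a : String), Dom_tong_so a → Spec_tong_so a (tong_so a)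

-- ===== LEMMAS AND PROOFS =====

-- A's loop body, on characters
def pvStepA (st : Int × Int × Nat) (c : Char) : Int × Int × Nat :=
  if PySem.Chars.isdigit c then
    (st.1, st.2.1 + ((c.toNat : Int) - 48) * 10 ^ st.2.2, st.2.2 + 1)
  else
    (st.1 + st.2.1, 0, 0)

-- B's loop body
def pvStepB (st : Int × Int) (c : Char) : Int × Int :=
  if PySem.Chars.isdigit c then (st.1, st.2 * 10 + ((c.toNat : Int) - 48))
  else (st.1 + st.2, 0)

-- A's backward scan is the foldr of pvStepA over the character list
def pvG (cs : List Char) : Int × Int × Nat :=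
  cs.foldr (fun c st => pvStepA st c) (0, 0, 0)

lemma pvG_cons (c : Char) (cs : List Char) : pvG (c :: cs) = pvStepA (pvG cs) c := rfl

-- length of the leading digit run
def pvLead (cs : List Char) : Nat :=
  match cs with
  | [] => 0
  | c :: cs => if PySem.Chars.isdigit c then pvLead cs + 1 else 0

-- the third component of A's state counts the leading digit run
lemma pvG_j (cs : List Char) : (pvG cs).2.2 = pvLead cs := by
  induction cs with
  | nil => rfl
  | cons c cs ih =>
    rw [pvG_cons]
    unfold pvStepA pvLead
    split_ifs <;> simp_all

-- A's indexed backward loop, rephrased as a foldr over the characters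
lemma pvA_eq_G (a : String) : tong_so a = (pvG ('*' :: a.toList)).1 := by
  have h0 : tong_so a = ((PySem.List.pyRange (PySem.List.len ('*' :: a.toList) - 1) (-1) (-1)).foldl
      (fun st i => pvStepA st (PySem.List.pyGetD ('*' :: a.toList) i ' ')) (0, 0, 0)).1 := rfl
  rw [h0]
  have hr : PySem.List.pyRange (PySem.List.len ('*' :: a.toList) - 1) (-1) (-1)
      = (PySem.List.pyRange 0 (PySem.List.len ('*' :: a.toList)) 1).reverse := by
    rw [PySem.List.pyRange_neg_one_eq_reverse]
    norm_num
  rw [hr]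
  rw [← List.foldl_map (f := fun i => PySem.List.pyGetD ('*' :: a.toList) i ' ') (g := pvStepA)]
  rw [List.map_reverse, PySem.List.map_pyGetD_pyRange_zero, List.foldl_reverse]
  rfl

-- B's forward Horner loop, from any accumulator, against the foldr characterisation of A
lemma pvMain (cs : List Char) : ∀ t cur : Int,
    (cs.foldl pvStepB (t, cur)).1 + (cs.foldl pvStepB (t, cur)).2
      = t + cur * 10 ^ pvLead cs + ((pvG cs).1 + (pvG cs).2.1) := by
  induction cs with
  | nil => intro t cur; simp [pvG, pvLead]
  | cons c cs ih =>
    intro t cur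
    rcases hG : pvG cs with ⟨s, so, j⟩
    have hj : j = pvLead cs := by have h := pvG_j cs; rw [hG] at h; exact h
    rw [List.foldl_cons, pvG_cons, hG]
    by_cases h : PySem.Chars.isdigit c
    · rw [show pvStepB (t, cur) c = (t, cur * 10 + ((c.toNat : Int) - 48)) from by
        simp [pvStepB, h]]
      rw [ih, hG]
      rw [show pvLead (c :: cs) = pvLead cs + 1 from by simp [pvLead, h]]
      rw [show pvStepA (s, so, j) c = (s, so + ((c.toNat : Int) - 48) * 10 ^ j, j + 1) from by
        simp [pvStepA, h]]
      subst hj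
      simp only
      ring
    · rw [show pvStepB (t, cur) c = (t + cur, 0) from by simp [pvStepB, h]]
      rw [ih, hG]
      rw [show pvLead (c :: cs) = 0 from by simp [pvLead, h]]
      rw [show pvStepA (s, so, j) c = (s + so, 0, 0) from by simp [pvStepA, h]]
      simp only
      ring

-- ===== VERDICT (by name: the statement is the Claim_ definition above) =====
theorem tong_so_spec : Claim_equal_tong_so := by
  intro a _
  unfold Spec_tong_so
  have halt : tong_so_alt a = (a.toList.foldl pvStepB (0, 0)).1 + (a.toList.foldl pvStepB (0, 0)).2 := rfl
  rw [pvA_eq_G, halt, pvG_cons]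
  rcases hG : pvG a.toList with ⟨s, so, j⟩
  rw [show pvStepA (s, so, j) '*' = (s + so, 0, 0) from by
    simp [pvStepA, show PySem.Chars.isdigit '*' = false from rfl]]
  have h := pvMain a.toList 0 0
  rw [hG] at h
  norm_num at h
  exact h.symm
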